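-- pv_equiv track=rewrite | github.com/ukkoon/leetcode | Array/Valid Sudoku.py | lineIsValid
-- ===== SOURCE A (Python) =====
-- from typing import List
--
-- def lineIsValid(unit: List[str]) -> bool:
--     nums = set()
--     for n in range(len(unit)):
--         if unit[n] in nums:
--             return False
--         elif unit[n] != '.':
--             nums.add(unit[n])
--     return True
-- ===== SOURCE B (Python) =====
-- def lineIsValid(unit):
--     digits = sorted(c for c in unit if c != '.')
--     return all(a != b for a, b in zip(digits, digits[1:]))
-- ===== Notes on version B (the rewrite author's own statement) =====
-- stated objective: alternative
-- what changed: Replaces A's hash-set membership scan with early exit by a sort-then-adjacent-compare: sort the non-'.' entries and check that no two neighbours are equal; no set is used at all.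
import Mathlib
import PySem

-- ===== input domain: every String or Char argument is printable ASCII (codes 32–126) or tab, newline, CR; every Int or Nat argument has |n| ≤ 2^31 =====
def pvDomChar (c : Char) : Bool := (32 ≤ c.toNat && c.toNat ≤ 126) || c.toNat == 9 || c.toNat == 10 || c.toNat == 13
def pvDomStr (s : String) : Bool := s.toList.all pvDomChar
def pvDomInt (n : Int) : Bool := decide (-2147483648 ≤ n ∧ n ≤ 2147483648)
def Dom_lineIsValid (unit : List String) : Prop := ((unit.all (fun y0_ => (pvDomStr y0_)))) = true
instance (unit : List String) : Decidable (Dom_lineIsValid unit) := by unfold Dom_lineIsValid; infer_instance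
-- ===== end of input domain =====

-- B replaces A's hash-set scan with a sort-then-adjacent-compare; same result, a different algorithm of similar cost.

-- ===== PORT A =====
-- the for-loop over indices 0..len(unit) with the growing set `nums` and its early `return False`,
-- as the obvious structural recursion over the same elements in order
def lineIsValidGo : List String → PySem.Set String → Bool
  | [], _ => true
  | x :: rest, nums =>
    if PySem.Set.contains nums x then false
    else if x != "." then lineIsValidGo rest (PySem.Set.add nums x)
    else lineIsValidGo rest nums

def lineIsValid (unit : List String) : Bool :=
  lineIsValidGo unit PySem.Set.empty

-- ===== PORT B =====
-- digits = sorted(c for c in unit if c != '.'); all(a != b for a, b in zip(digits, digits[1:]))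
def lineIsValid_alt (unit : List String) : Bool :=
  let digits := PySem.List.sorted (unit.filter (fun c => c != ".")) (fun x => x) false
  (digits.zip digits.tail).all (fun p => p.1 != p.2)

-- ===== PRECONDITION & SPEC =====
def Spec_lineIsValid (unit : List String) (out : Bool) : Prop := out = lineIsValid_alt unit
instance (unit : List String) (out : Bool) : Decidable (Spec_lineIsValid unit out) := by unfold Spec_lineIsValid; infer_instance

-- ===== CLAIM (what is proved, stated in full; the proofs are below) =====
def Claim_equal_lineIsValid : Prop := ∀ (unit : List String), Dom_lineIsValid unit → Spec_lineIsValid unit (lineIsValid unit)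

-- ===== LEMMAS AND PROOFS =====

-- invariant for A's loop: with '.' never in nums, the loop succeeds iff the remaining
-- non-'.' entries are duplicate-free and disjoint from nums
theorem go_true_iff (l : List String) (nums : PySem.Set String) (hdot : "." ∉ nums) :
    lineIsValidGo l nums = true ↔
      ((l.filter (fun c => c != ".")).Nodup ∧ ∀ x ∈ l.filter (fun c => c != "."), x ∉ nums) := by
  induction l generalizing nums with
  | nil => simp [lineIsValidGo]
  | cons x rest ih =>
    simp only [lineIsValidGo]
    by_cases hmem : x ∈ nums
    · have hc : PySem.Set.contains nums x = true := by simp [hmem]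
      have hx : x ≠ "." := fun h => hdot (h ▸ hmem)
      simp only [hc, if_true]
      constructor
      · simp
      · rintro ⟨-, hdisj⟩
        exact absurd hmem (hdisj x (by simp [hx]))
    · have hc : PySem.Set.contains nums x = false := by simp [hmem]
      simp only [hc, Bool.false_eq_true, if_false]
      by_cases hx : x = "."
      · subst hx
        simp only [bne_self_eq_false, Bool.false_eq_true, if_false]
        rw [ih nums hdot]
        simp
      · have hfe : (x != ".") = true := by simp [hx]
        simp only [hfe, if_true]
        have hdot' : "." ∉ PySem.Set.add nums x := by
          rw [PySem.Set.mem_add]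
          rintro (h | h)
          · exact hdot h
          · exact hx h.symm
        rw [ih (PySem.Set.add nums x) hdot']
        simp only [List.filter_cons, hfe, if_true, List.nodup_cons, List.forall_mem_cons,
          PySem.Set.mem_add, hmem, not_false_iff, true_and, not_or]
        constructor
        · rintro ⟨hnd, hdisj⟩
          exact ⟨⟨fun hxm => (hdisj x hxm).2 rfl, hnd⟩, fun y hy => (hdisj y hy).1⟩
        · rintro ⟨⟨hxn, hnd⟩, hdisj⟩
          exact ⟨hnd, fun y hy => ⟨hdisj y hy, fun h => hxn (h ▸ hy)⟩⟩

-- all(a != b for a, b in zip(xs, xs[1:])) says exactly: adjacent elements differ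
theorem zip_tail_all_iff (xs : List String) :
    ((xs.zip xs.tail).all (fun p => p.1 != p.2) = true) ↔ List.IsChain (· ≠ ·) xs := by
  induction xs with
  | nil => simp
  | cons a l ih =>
    cases l with
    | nil => simp
    | cons b t =>
      simp only [List.tail_cons, List.zip_cons_cons, List.all_cons, Bool.and_eq_true,
        bne_iff_ne, List.isChain_cons_cons]
      simp only [List.tail_cons] at ih
      rw [ih]

-- on a list sorted weakly increasing, adjacent-distinct is exactly duplicate-freeness
theorem chain_ne_iff_nodup_of_sorted (xs : List String)
    (hs : xs.Pairwise (· ≤ ·)) :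
    List.IsChain (· ≠ ·) xs ↔ xs.Nodup := by
  constructor
  · intro hc
    induction xs with
    | nil => simp
    | cons a l ih =>
      rcases List.pairwise_cons.1 hs with ⟨hle, hpl⟩
      rw [List.isChain_cons] at hc
      rcases hc with ⟨hhead, hcl⟩
      simp only [Option.mem_def] at hhead
      refine List.nodup_cons.2 ⟨?_, ih hpl hcl⟩
      intro hmem
      cases l with
      | nil => simp at hmem
      | cons b t =>
        have hab : a ≠ b := hhead b rfl
        have halb : a < b := lt_of_le_of_ne (hle b (by simp)) hab
        rcases List.mem_cons.1 hmem with h | h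
        · exact hab h
        · rcases List.pairwise_cons.1 hpl with ⟨hble, -⟩
          have : a < a := lt_of_lt_of_le halb (hble a h)
          exact lt_irrefl a this
  · intro hnd
    exact List.Pairwise.isChain hnd

theorem alt_true_iff (unit : List String) :
    lineIsValid_alt unit = true ↔ (unit.filter (fun c => c != ".")).Nodup := by
  unfold lineIsValid_alt
  rw [zip_tail_all_iff]
  rw [chain_ne_iff_nodup_of_sorted _ (PySem.List.sorted_pairwise _ _)]
  exact (PySem.List.sorted_perm _ _ _).nodup_iff

-- ===== VERDICT (by name: the statement is the Claim_ definition above) =====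
theorem lineIsValid_spec : Claim_equal_lineIsValid := by
  intro unit _
  unfold Spec_lineIsValid
  rw [Bool.eq_iff_iff, alt_true_iff]
  unfold lineIsValid
  rw [go_true_iff unit PySem.Set.empty (by simp [PySem.Set.empty])]
  simp [PySem.Set.empty]
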